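-- pv_equiv track=rewrite | github.com/Eryzium23/Resolution-Labyrinthe | src/labyrinthe.py | labInit
-- ===== SOURCE A (Python) =====
-- def labInit(dim,pil,murH,murV):
--
--     # Dimensions du tableau labyrinthe :
--     larg = 4*dim+1
--     haut = 2*dim+1
--
--     # Toutes les cases sont vides au début
--     lab = [[" " for j in range(0,larg)] for i in range(0,haut)]
--
--     # On parcours toute les cases
--     for i in range(0,haut):
--         for j in range(0,larg):
--             if(i % 2 == 0):              # Si la ligne est paire
--                 if(j % 4 == 0):             # Et que la colonne est un multiple de 4
--                     lab[i][j]=pil               # On met un pilier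
--                 else:                       # Si la colonne n'est pas un multiple de 4
--                     lab[i][j]=murH              # On met un mur horizontale
--             else:                       # Si la ligne est imparire
--                 if(j % 4 == 0) :             # Si la colonne est un multiple de 4
--                     lab[i][j]=murV              # On met un mur vertical "|"
--     return lab                          # On retourne le tableau
-- ===== SOURCE B (Python) =====
-- def labInit(dim, pil, murH, murV):
--     # Period replication: the grid is a 4-column block repeated per row and a
--     # 2-row block repeated vertically, closed off by the first column / row.
--     even = [pil, murH, murH, murH] * dim + [pil]
--     odd = [murV, " ", " ", " "] * dim + [murV]
--     lab = []
--     for _ in range(dim):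
--         lab.append(list(even))
--         lab.append(list(odd))
--     lab.append(list(even))
--     return lab
-- ===== Notes on version B (the rewrite author's own statement) =====
-- stated objective: alternative
-- what changed: B replaces the nested per-cell loop with i%2/j%4 conditionals by pure block replication: each row is a 4-cell period block repeated dim times plus the closing pillar column, and the grid is the (even,odd) 2-row block repeated dim times plus the closing even row; no modular tests and no cell mutation at all.
-- outside the precondition, e.g. on labInit(-1, '+', '-', '|'): A returns [], B returns [['+']]
import Mathlib
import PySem

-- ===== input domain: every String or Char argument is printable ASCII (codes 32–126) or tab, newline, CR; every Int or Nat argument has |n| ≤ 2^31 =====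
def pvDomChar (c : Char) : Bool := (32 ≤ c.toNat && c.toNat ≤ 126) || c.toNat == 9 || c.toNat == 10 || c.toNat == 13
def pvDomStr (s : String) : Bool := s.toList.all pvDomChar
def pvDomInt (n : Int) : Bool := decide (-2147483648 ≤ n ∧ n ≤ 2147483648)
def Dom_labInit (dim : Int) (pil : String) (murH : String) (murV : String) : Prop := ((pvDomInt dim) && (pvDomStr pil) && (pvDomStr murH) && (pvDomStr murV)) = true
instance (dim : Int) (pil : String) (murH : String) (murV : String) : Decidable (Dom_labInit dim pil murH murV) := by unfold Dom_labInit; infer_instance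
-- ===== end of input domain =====

-- B builds the grid by period replication (a 4-cell block per row, a 2-row block vertically,
-- each closed by the leading column/row) instead of A's per-cell nested loop with parity tests.
-- (Return-value equivalence; both programs are pure on their inputs.)

-- ===== PORT A =====
-- lab[i][j] = v is ported with pySetD/pyGetD; exact here since i, j always come from in-range loop indices.
def labInit (dim : Int) (pil : String) (murH : String) (murV : String) : List (List String) :=
  let larg : Int := 4 * dim + 1
  let haut : Int := 2 * dim + 1
  let lab : List (List String) :=
    (PySem.List.pyRange 0 haut 1).map (fun _ => (PySem.List.pyRange 0 larg 1).map (fun _ => " "))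
  (PySem.List.pyRange 0 haut 1).foldl (fun lab i =>
    (PySem.List.pyRange 0 larg 1).foldl (fun lab j =>
      if i % 2 == 0 then
        if j % 4 == 0 then
          PySem.List.pySetD lab i (PySem.List.pySetD (PySem.List.pyGetD lab i []) j pil)
        else
          PySem.List.pySetD lab i (PySem.List.pySetD (PySem.List.pyGetD lab i []) j murH)
      else
        if j % 4 == 0 then
          PySem.List.pySetD lab i (PySem.List.pySetD (PySem.List.pyGetD lab i []) j murV)
        else
          lab) lab) lab

-- ===== PORT B =====
-- Python's 'xs * dim' is flatten (replicate dim.toNat xs) (both give [] for dim < 0 on 0 ≤ dim's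
-- complement only via clamping, identical to Python); 'list(even)' fresh copies are the identity
-- on immutable Lean lists.
def labInit_alt (dim : Int) (pil : String) (murH : String) (murV : String) : List (List String) :=
  let even : List String := (List.replicate dim.toNat [pil, murH, murH, murH]).flatten ++ [pil]
  let odd : List String := (List.replicate dim.toNat [murV, " ", " ", " "]).flatten ++ [murV]
  let lab : List (List String) :=
    (PySem.List.pyRange 0 dim 1).foldl (fun lab _ => lab ++ [even, odd]) []
  lab ++ [even]

-- ===== PRECONDITION & SPEC =====
-- Pre_ restricts to the natural domain of the task (a labyrinth of nonnegative dimension):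
-- on dim < 0, A's empty ranges return [] while B's natural replication returns [[pil]].
def Pre_labInit (dim : Int) (pil : String) (murH : String) (murV : String) : Prop := 0 ≤ dim
instance (dim : Int) (pil : String) (murH : String) (murV : String) : Decidable (Pre_labInit dim pil murH murV) := by unfold Pre_labInit; infer_instance
def pvWitness_labInit : Int × String × String × String := (2, "+", "-", "|")

def Spec_labInit (dim : Int) (pil : String) (murH : String) (murV : String) (out : List (List String)) : Prop := out = labInit_alt dim pil murH murV
instance (dim : Int) (pil : String) (murH : String) (murV : String) (out : List (List String)) : Decidable (Spec_labInit dim pil murH murV out) := by unfold Spec_labInit; infer_instance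

-- ===== CLAIM (what is proved, stated in full; the proofs are below) =====
def Claim_equal_labInit : Prop := ∀ (dim : Int) (pil : String) (murH : String) (murV : String), Dom_labInit dim pil murH murV → Pre_labInit dim pil murH murV → Spec_labInit dim pil murH murV (labInit dim pil murH murV)

-- ===== LEMMAS AND PROOFS =====

-- whether cell (i, j) gets written, and what value is written there (A-side characterisation)
def pvP (i j : Int) : Bool := if i % 2 == 0 then true else j % 4 == 0
def pvG (pil murH murV : String) (i j : Int) : String :=
  if i % 2 == 0 then (if j % 4 == 0 then pil else murH) else murV
def pvRowStep (P : Int → Bool) (g : Int → String) (r : List String) (j : Int) : List String :=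
  if P j then r.set j.toNat (g j) else r
def pvTmpl (P : Int → Bool) (g : Int → String) (L : Nat) : List String :=
  (PySem.List.pyRange 0 (L : Int) 1).map (fun j => if P j then g j else " ")

lemma pvIf_shift (P : Int → Bool) (g : Int → String) (n j : Int)
    (hj : j ≠ n ∨ P j ≠ true) :
    (if j < n ∧ P j = true then g j else " ")
      = (if j < n + 1 ∧ P j = true then g j else " ") := by
  by_cases hP : P j = true
  · by_cases h1 : j < n
    · rw [if_pos ⟨h1, hP⟩, if_pos ⟨by omega, hP⟩]
    · have h2 : ¬ j < n + 1 := by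
        rcases hj with h | h
        · omega
        · exact absurd hP h
      rw [if_neg (fun c => h1 c.1), if_neg (fun c => h2 c.1)]
  · rw [if_neg (fun c => hP c.2), if_neg (fun c => hP c.2)]

lemma pvRowFold_partial (P : Int → Bool) (g : Int → String) (L : Nat) :
    ∀ n : Nat, n ≤ L →
    (PySem.List.pyRange 0 (n : Int) 1).foldl (pvRowStep P g) (List.replicate L " ")
      = (PySem.List.pyRange 0 (L : Int) 1).map
          (fun j => if j < (n : Int) ∧ P j = true then g j else " ") := by
  intro n
  induction n with
  | zero =>
      intro _
      rw [PySem.List.pyRange_one_eq_nil (by omega)]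
      simp only [List.foldl_nil]
      have h : (PySem.List.pyRange 0 (L : Int) 1).map
          (fun j => if j < ((0 : Nat) : Int) ∧ P j = true then g j else " ")
          = (PySem.List.pyRange 0 (L : Int) 1).map (fun _ => " ") := by
        apply List.map_congr_left
        intro j hj
        have := (PySem.List.mem_pyRange_one).1 hj
        rw [if_neg]
        omega
      have hlen : (((L : Int) - 0).toNat) = L := by omega
      rw [h, List.map_const', PySem.List.length_pyRange_one, hlen]
  | succ n ih =>
      intro hn
      have hc : ((n + 1 : Nat) : Int) = (n : Int) + 1 := by push_cast; ring
      rw [hc, PySem.List.pyRange_one_succ_right (by omega), List.foldl_append,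
        List.foldl_cons, List.foldl_nil, ih (by omega)]
      by_cases hP : P (n : Int) = true
      · rw [pvRowStep, if_pos hP]
        apply List.ext_getElem
        · simp
        · intro k h₁ h₂
          have hkL : k < L := by
            simpa [PySem.List.length_pyRange_one] using h₂
          have hnL : (n : Nat) < L := by omega
          rw [List.getElem_set]
          by_cases hk : ((n : Int)).toNat = k
          · rw [if_pos hk]
            simp only [List.getElem_map, PySem.List.getElem_pyRange_one, zero_add]
            have hkn : (k : Int) = (n : Int) := by omega
            rw [hkn, if_pos ⟨by omega, hP⟩]
          · rw [if_neg hk]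
            simp only [List.getElem_map, PySem.List.getElem_pyRange_one, zero_add]
            exact pvIf_shift P g (n : Int) (k : Int) (Or.inl (by omega))
      · rw [pvRowStep, if_neg hP]
        apply List.map_congr_left
        intro j hj
        have hjm := (PySem.List.mem_pyRange_one).1 hj
        by_cases hjn : j = (n : Int)
        · exact pvIf_shift P g (n : Int) j (Or.inr (hjn ▸ hP))
        · exact pvIf_shift P g (n : Int) j (Or.inl hjn)

lemma pvRowFold_full (P : Int → Bool) (g : Int → String) (L : Nat) :
    (PySem.List.pyRange 0 (L : Int) 1).foldl (pvRowStep P g) (List.replicate L " ")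
      = pvTmpl P g L := by
  rw [pvRowFold_partial P g L L le_rfl, pvTmpl]
  apply List.map_congr_left
  intro j hj
  have hjm := (PySem.List.mem_pyRange_one).1 hj
  by_cases hPj : P j = true
  · rw [if_pos ⟨by omega, hPj⟩, if_pos hPj]
  · rw [if_neg (by rintro ⟨_, h⟩; exact hPj h), if_neg hPj]

lemma pvLabFold_localize (P : Int → Bool) (g : Int → String) (i : Nat) :
    ∀ (js : List Int) (lab : List (List String)), i < lab.length →
    js.foldl (fun lab j => if P j then lab.set i ((lab.getD i []).set j.toNat (g j)) else lab) lab
      = lab.set i (js.foldl (pvRowStep P g) (lab.getD i [])) := by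
  intro js
  induction js with
  | nil =>
      intro lab hi
      simp only [List.foldl_nil]
      rw [List.getD_eq_getElem _ _ hi, List.set_getElem_self]
  | cons j js ih =>
      intro lab hi
      simp only [List.foldl_cons]
      by_cases hP : P j = true
      · rw [if_pos hP]
        have hi' : i < (lab.set i ((lab.getD i []).set j.toNat (g j))).length := by
          simpa using hi
        rw [ih _ hi']
        have hget : (lab.set i ((lab.getD i []).set j.toNat (g j))).getD i []
            = (lab.getD i []).set j.toNat (g j) := by
          rw [List.getD_eq_getElem _ _ hi', List.getElem_set, if_pos rfl]
        rw [hget, List.set_set, pvRowStep, if_pos hP]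
      · rw [if_neg hP, ih _ hi, pvRowStep, if_neg hP]

lemma pvOuter (pil murH murV : String) (H L : Nat) :
    ∀ n : Nat, n ≤ H →
    (PySem.List.pyRange 0 (n : Int) 1).foldl
      (fun lab i => (PySem.List.pyRange 0 (L : Int) 1).foldl
        (fun lab j => if pvP i j then
            lab.set i.toNat ((lab.getD i.toNat []).set j.toNat (pvG pil murH murV i j))
          else lab) lab)
      ((PySem.List.pyRange 0 (H : Int) 1).map (fun _ => List.replicate L " "))
      = (PySem.List.pyRange 0 (H : Int) 1).map
          (fun i => if i < (n : Int) then pvTmpl (pvP i) (pvG pil murH murV i) L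
            else List.replicate L " ") := by
  intro n
  induction n with
  | zero =>
      intro _
      rw [PySem.List.pyRange_one_eq_nil (show (((0 : Nat) : Int)) ≤ 0 by omega)]
      simp only [List.foldl_nil]
      apply List.map_congr_left
      intro i hi
      have := (PySem.List.mem_pyRange_one).1 hi
      rw [if_neg (by omega)]
  | succ n ih =>
      intro hn
      have hc : ((n + 1 : Nat) : Int) = (n : Int) + 1 := by push_cast; ring
      rw [hc, PySem.List.pyRange_one_succ_right (by omega), List.foldl_append,
        List.foldl_cons, List.foldl_nil, ih (by omega)]
      set labn := (PySem.List.pyRange 0 (H : Int) 1).map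
        (fun i => if i < (n : Int) then pvTmpl (pvP i) (pvG pil murH murV i) L
          else List.replicate L " ") with hlabn
      have hnH : n < H := by omega
      have hlen : labn.length = H := by
        rw [hlabn]
        simp only [List.length_map, PySem.List.length_pyRange_one]
        omega
      have htn : ((n : Int)).toNat = n := by omega
      rw [htn]
      have hloc := pvLabFold_localize (pvP (n : Int)) (pvG pil murH murV (n : Int)) n
        (PySem.List.pyRange 0 (L : Int) 1) labn (by rw [hlen]; exact hnH)
      rw [hloc]
      have hget : labn.getD n [] = List.replicate L " " := by
        rw [hlabn, List.getD_eq_getElem _ _ (by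
          simp only [List.length_map, PySem.List.length_pyRange_one]; omega)]
        simp only [List.getElem_map, PySem.List.getElem_pyRange_one, zero_add]
        rw [if_neg (by omega)]
      rw [hget, pvRowFold_full]
      apply List.ext_getElem
      · rw [hlabn]
        simp
      · intro k h₁ h₂
        have hkH : k < H := by
          simpa [PySem.List.length_pyRange_one] using h₂
        rw [List.getElem_set]
        by_cases hk : n = k
        · subst hk
          rw [if_pos rfl]
          simp only [List.getElem_map, PySem.List.getElem_pyRange_one, zero_add]
          rw [if_pos (by exact_mod_cast Nat.lt_succ_self n)]
        · rw [if_neg hk]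
          simp only [hlabn, List.getElem_map, PySem.List.getElem_pyRange_one, zero_add]
          by_cases hlt : (k : Int) < (n : Int)
          · rw [if_pos hlt, if_pos (by omega)]
          · rw [if_neg hlt, if_neg (by omega)]

lemma pvA_canon (dim : Int) (pil murH murV : String) (H L : Nat)
    (hH : (2 * dim + 1 : Int) = (H : Int)) (hL : (4 * dim + 1 : Int) = (L : Int)) :
    labInit dim pil murH murV
      = (PySem.List.pyRange 0 (H : Int) 1).foldl
          (fun lab i => (PySem.List.pyRange 0 (L : Int) 1).foldl
            (fun lab j => if pvP i j then
                lab.set i.toNat ((lab.getD i.toNat []).set j.toNat (pvG pil murH murV i j))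
              else lab) lab)
          ((PySem.List.pyRange 0 (H : Int) 1).map (fun _ => List.replicate L " ")) := by
  rw [labInit]
  simp only [hH, hL]
  have hinit : (PySem.List.pyRange 0 (L : Int) 1).map (fun _ => (" " : String))
      = List.replicate L " " := by
    have h2 : (((L : Int)) - 0).toNat = L := by omega
    rw [List.map_const', PySem.List.length_pyRange_one, h2]
  rw [hinit]
  apply PySem.List.foldl_congr_mem
  intro lab i himem
  have hi0 : 0 ≤ i := ((PySem.List.mem_pyRange_one).1 himem).1
  apply PySem.List.foldl_congr_mem
  intro lab j hjmem
  have hj0 : 0 ≤ j := ((PySem.List.mem_pyRange_one).1 hjmem).1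
  rw [PySem.List.pyGetD_of_nonneg _ _ hi0]
  by_cases hpar : (i % 2 == 0) = true
  · rw [if_pos hpar]
    by_cases hj4 : (j % 4 == 0) = true
    · rw [if_pos hj4, PySem.List.pySetD_of_nonneg _ _ hj0,
        PySem.List.pySetD_of_nonneg _ _ hi0, if_pos (by simp [pvP, hpar])]
      simp [pvG, hpar, hj4]
    · rw [if_neg hj4, PySem.List.pySetD_of_nonneg _ _ hj0,
        PySem.List.pySetD_of_nonneg _ _ hi0, if_pos (by simp [pvP, hpar])]
      simp [pvG, hpar, hj4]
  · rw [if_neg hpar]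
    by_cases hj4 : (j % 4 == 0) = true
    · rw [if_pos hj4, PySem.List.pySetD_of_nonneg _ _ hj0,
        PySem.List.pySetD_of_nonneg _ _ hi0, if_pos (by simp [pvP, hpar, hj4])]
      simp [pvG, hpar]
    · rw [if_neg hj4, if_neg (by simp [pvP, hpar, hj4])]

-- a map over range(4d+1) selecting on j%4==0 is the 4-block repeated d times plus the closer
lemma pvP4 {α : Type} (a b : α) :
    ∀ d : Nat, (PySem.List.pyRange 0 (4 * (d : Int) + 1) 1).map
        (fun j => if j % 4 == 0 then a else b)
      = (List.replicate d [a, b, b, b]).flatten ++ [a] := by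
  intro d
  induction d with
  | zero =>
      have h : (4 * ((0 : Nat) : Int) + 1) = 0 + 1 := by norm_num
      rw [h, PySem.List.pyRange_one_singleton]
      simp
  | succ d ih =>
      have hc : (4 * ((d + 1 : Nat) : Int) + 1)
          = (((4 * (d : Int) + 1) + 1) + 1) + 1 + 1 := by push_cast; ring
      rw [hc, PySem.List.pyRange_one_succ_right (by omega),
        PySem.List.pyRange_one_succ_right (by omega),
        PySem.List.pyRange_one_succ_right (by omega),
        PySem.List.pyRange_one_succ_right (by omega)]
      simp only [List.map_append, List.map_cons, List.map_nil, ih]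
      have e1 : ((4 * (d : Int) + 1) % 4 == 0) = false := by
        have : (4 * (d : Int) + 1) % 4 = 1 := by omega
        simp [this]
      have e2 : (((4 * (d : Int) + 1) + 1) % 4 == 0) = false := by
        have : ((4 * (d : Int) + 1) + 1) % 4 = 2 := by omega
        simp [this]
      have e3 : ((((4 * (d : Int) + 1) + 1) + 1) % 4 == 0) = false := by
        have : (((4 * (d : Int) + 1) + 1) + 1) % 4 = 3 := by omega
        simp [this]
      have e4 : (((((4 * (d : Int) + 1) + 1) + 1) + 1) % 4 == 0) = true := by
        have : ((((4 * (d : Int) + 1) + 1) + 1) + 1) % 4 = 0 := by omega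
        simp [this]
      rw [e1, e2, e3, e4]
      simp [List.replicate_succ']

-- a map over range(2d+1) selecting on i%2==0 is the 2-row block repeated d times plus the closer
lemma pvP2 {α : Type} (E O : α) :
    ∀ d : Nat, (PySem.List.pyRange 0 (2 * (d : Int) + 1) 1).map
        (fun i => if i % 2 == 0 then E else O)
      = (List.replicate d [E, O]).flatten ++ [E] := by
  intro d
  induction d with
  | zero =>
      have h : (2 * ((0 : Nat) : Int) + 1) = 0 + 1 := by norm_num
      rw [h, PySem.List.pyRange_one_singleton]
      simp
  | succ d ih =>
      have hc : (2 * ((d + 1 : Nat) : Int) + 1) = ((2 * (d : Int) + 1) + 1) + 1 := by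
        push_cast; ring
      rw [hc, PySem.List.pyRange_one_succ_right (by omega),
        PySem.List.pyRange_one_succ_right (by omega)]
      simp only [List.map_append, List.map_cons, List.map_nil, ih]
      have e1 : ((2 * (d : Int) + 1) % 2 == 0) = false := by
        have : (2 * (d : Int) + 1) % 2 = 1 := by omega
        simp [this]
      have e2 : (((2 * (d : Int) + 1) + 1) % 2 == 0) = true := by
        have : ((2 * (d : Int) + 1) + 1) % 2 = 0 := by omega
        simp [this]
      rw [e1, e2]
      simp [List.replicate_succ']

-- B's accumulation loop is flatten of a replicated 2-row block
lemma pvBfold (E O : List String) :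
    ∀ (d : Nat) (init : List (List String)),
    (PySem.List.pyRange 0 (d : Int) 1).foldl (fun lab _ => lab ++ [E, O]) init
      = init ++ (List.replicate d [E, O]).flatten := by
  intro d
  induction d with
  | zero =>
      intro init
      rw [PySem.List.pyRange_one_eq_nil (by omega)]
      simp
  | succ d ih =>
      intro init
      have hc : ((d + 1 : Nat) : Int) = (d : Int) + 1 := by push_cast; ring
      rw [hc, PySem.List.pyRange_one_succ_right (by omega), List.foldl_append,
        List.foldl_cons, List.foldl_nil, ih]
      simp [List.replicate_succ']

-- ===== VERDICT (by name: the statement is the Claim_ definition above) =====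
theorem labInit_spec : Claim_equal_labInit := by
  intro dim pil murH murV _ hpre
  unfold Pre_labInit at hpre
  unfold Spec_labInit
  obtain ⟨d, hd⟩ : ∃ d : Nat, dim = (d : Int) := ⟨dim.toNat, by omega⟩
  subst hd
  have hH : (2 * (d : Int) + 1) = ((2 * d + 1 : Nat) : Int) := by push_cast; ring
  have hL : (4 * (d : Int) + 1) = ((4 * d + 1 : Nat) : Int) := by push_cast; ring
  rw [pvA_canon _ pil murH murV (2 * d + 1) (4 * d + 1) hH hL,
    pvOuter pil murH murV (2 * d + 1) (4 * d + 1) (2 * d + 1) le_rfl]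
  have hA : (PySem.List.pyRange 0 ((2 * d + 1 : Nat) : Int) 1).map
      (fun i => if i < ((2 * d + 1 : Nat) : Int)
        then pvTmpl (pvP i) (pvG pil murH murV i) (4 * d + 1)
        else List.replicate (4 * d + 1) " ")
      = (PySem.List.pyRange 0 (2 * (d : Int) + 1) 1).map
          (fun i => if i % 2 == 0
            then (List.replicate d [pil, murH, murH, murH]).flatten ++ [pil]
            else (List.replicate d [murV, " ", " ", " "]).flatten ++ [murV]) := by
    rw [← hH]
    apply List.map_congr_left
    intro i hi
    have him := (PySem.List.mem_pyRange_one).1 hi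
    rw [if_pos (by omega)]
    by_cases hpar : (i % 2 == 0) = true
    · rw [if_pos hpar, ← pvP4 pil murH d, pvTmpl, ← hL]
      apply List.map_congr_left
      intro j _
      simp [pvP, pvG, hpar]
    · rw [if_neg hpar, ← pvP4 murV " " d, pvTmpl, ← hL]
      apply List.map_congr_left
      intro j _
      by_cases hj : (j % 4 == 0) = true
      · simp [pvP, pvG, hpar, hj]
      · simp [pvP, hpar, hj]
  rw [hA, pvP2 _ _ d]
  rw [labInit_alt]
  have ht : ((d : Int)).toNat = d := by omega
  rw [ht, pvBfold _ _ d]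
  simp
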